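-- pv_equiv track=rewrite | github.com/lza6/claw-code-tingfeng | src/tools_runtime/code_edit/fuzzy_matcher.py | replace_part_with_missing_leading_whitespace
-- ===== SOURCE A (Python) =====
-- def replace_part_with_missing_leading_whitespace(
--     whole_lines: list[str],
--     part_lines: list[str],
--     replace_lines: list[str],
-- ) -> str | None:
--     """空白容错匹配
--
--     GPT 经常搞错缩进。这个函数尝试找到内容相同但缩进不同的匹配。
--
--     借鉴 Aider 的 replace_part_with_missing_leading_whitespace() 函数。
--     """
--     # 计算最小缩进
--     leading = [
--         len(p) - len(p.lstrip()) for p in part_lines if p.strip()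
--     ] + [
--         len(p) - len(p.lstrip()) for p in replace_lines if p.strip()
--     ]
--
--     if leading and min(leading):
--         num_leading = min(leading)
--         part_lines = [p[num_leading:] if p.strip() else p for p in part_lines]
--         replace_lines = [p[num_leading:] if p.strip() else p for p in replace_lines]
--
--     # 尝试找到忽略缩进的匹配
--     num_part_lines = len(part_lines)
--
--     for i in range(len(whole_lines) - num_part_lines + 1):
--         add_leading = match_but_for_leading_whitespace(
--             whole_lines[i : i + num_part_lines], part_lines
--         )
--
--         if add_leading is None:
--             continue
--
--         # 添加正确的缩进到替换内容
--         replace_lines = [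
--             add_leading + rline if rline.strip() else rline
--             for rline in replace_lines
--         ]
--         whole_lines = whole_lines[:i] + replace_lines + whole_lines[i + num_part_lines :]
--         return "".join(whole_lines)
--
--     return None
--
-- def match_but_for_leading_whitespace(
--     whole_lines: list[str],
--     part_lines: list[str],
-- ) -> str | None:
--     """检查去除缩进后是否匹配
--
--     Returns:
--         需要添加的前导空白，如果不匹配则返回 None
--     """
--     num = len(whole_lines)
--
--     # 检查去除空白后的内容是否相同
--     if not all(
--         whole_lines[i].lstrip() == part_lines[i].lstrip() for i in range(num)
--     ):
--         return None
--
--     # 检查所有行的缩进差异是否一致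
--     add = set(
--         whole_lines[i][: len(whole_lines[i]) - len(part_lines[i])]
--         for i in range(num)
--         if whole_lines[i].strip()
--     )
--
--     if len(add) != 1:
--         return None
--
--     return add.pop()
-- ===== SOURCE B (Python) =====
-- def replace_part_with_missing_leading_whitespace(
--     whole_lines: list[str],
--     part_lines: list[str],
--     replace_lines: list[str],
-- ) -> str | None:
--     # dedent part/replace by their common minimum indent
--     leading = [len(p) - len(p.lstrip()) for p in part_lines + replace_lines if p.strip()]
--     if leading and min(leading):
--         k = min(leading)
--         part_lines = [p[k:] if p.strip() else p for p in part_lines]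
--         replace_lines = [p[k:] if p.strip() else p for p in replace_lines]
--
--     m = len(part_lines)
--     if m == 0:
--         return None  # an empty pattern never yields an indent prefix, so no window matches
--
--     sw = [w.lstrip() for w in whole_lines]
--     sp = [p.lstrip() for p in part_lines]
--     n = len(whole_lines)
--
--     # rarest-anchor search: pick the part line whose stripped text occurs least often
--     cnt = {}
--     for s in sw:
--         cnt[s] = cnt.get(s, 0) + 1
--     t = min(range(m), key=lambda k: cnt.get(sp[k], 0))
--     key = sp[t]
--
--     # candidate windows are exactly those aligning an occurrence of the anchor
--     occ = [j for j, s in enumerate(sw) if s == key]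
--     for j in occ:
--         i = j - t
--         if i < 0 or i > n - m:
--             continue
--         add = _match_indent(whole_lines[i:i + m], part_lines)
--         if add is None:
--             continue
--         new_replace = [add + r if r.strip() else r for r in replace_lines]
--         return "".join(whole_lines[:i] + new_replace + whole_lines[i + m:])
--     return None
--
--
-- def _match_indent(window: list[str], part: list[str]) -> str | None:
--     # fused single pass: stripped equality and a uniform indent prefix, bail at first conflict
--     add = None
--     for w, p in zip(window, part):
--         if w.lstrip() != p.lstrip():
--             return None
--         if not w.strip():
--             continue
--         pref = w[: len(w) - len(p)]
--         if add is None: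
--             add = pref
--         elif add != pref:
--             return None
--     return add
-- ===== Notes on version B (the rewrite author's own statement) =====
-- stated objective: alternative
-- what changed: B replaces A's blind scan of every window start with a rarest-anchor search: it counts stripped-line frequencies once, picks the part line whose stripped text is least frequent, precomputes the occurrence list of that anchor, and only verifies windows aligned on an anchor occurrence with a fused single-pass check (stripped equality and uniform indent together), returning None immediately for an empty pattern.
import Mathlib
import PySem

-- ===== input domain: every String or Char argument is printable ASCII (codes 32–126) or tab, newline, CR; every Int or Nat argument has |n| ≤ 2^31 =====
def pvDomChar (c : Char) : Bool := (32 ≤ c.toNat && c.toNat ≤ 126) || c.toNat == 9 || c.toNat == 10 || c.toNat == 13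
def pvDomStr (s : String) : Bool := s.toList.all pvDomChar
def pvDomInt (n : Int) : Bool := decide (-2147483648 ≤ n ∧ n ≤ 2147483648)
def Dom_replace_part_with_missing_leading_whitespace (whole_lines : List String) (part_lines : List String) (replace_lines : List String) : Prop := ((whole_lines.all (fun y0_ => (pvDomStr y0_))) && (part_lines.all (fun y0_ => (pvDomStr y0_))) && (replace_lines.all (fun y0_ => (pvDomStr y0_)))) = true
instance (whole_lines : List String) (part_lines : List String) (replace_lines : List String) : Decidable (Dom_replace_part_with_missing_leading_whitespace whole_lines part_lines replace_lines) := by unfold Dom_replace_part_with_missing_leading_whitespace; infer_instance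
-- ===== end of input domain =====

-- B replaces A's blind window scan by a rarest-anchor search (stripped-line frequency counter,
-- occurrence list of the rarest part line, fused verify); objective: alternative.


-- shared helpers: these four fragments are LITERALLY the same code in both Python sources
-- [len(p) - len(p.lstrip()) for p in lines if p.strip()]
def pvLeads (lines : List String) : List Int :=
  lines.filterMap (fun p =>
    if PySem.Str.strip p ≠ "" then some (PySem.Str.len p - PySem.Str.len (PySem.Str.lstrip p)) else none)

-- [p[k:] if p.strip() else p for p in lines]
def pvDedent (k : Int) (lines : List String) : List String :=
  lines.map (fun p => if PySem.Str.strip p ≠ "" then PySem.Str.slice p (some k) none else p)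

-- [add + r if r.strip() else r for r in lines]
def pvAddIndent (add : String) (lines : List String) : List String :=
  lines.map (fun r => if PySem.Str.strip r ≠ "" then add ++ r else r)

-- "".join(whole[:i] + repl + whole[j:])
def pvSplice (whole repl : List String) (i j : Int) : String :=
  PySem.Str.join "" (PySem.List.slice whole none (some i) ++ repl ++ PySem.List.slice whole (some j) none)

-- whole[i][: len(whole[i]) - len(part[i])]
def pvPrefixOf (w p : String) : String :=
  PySem.Str.slice w none (some (PySem.Str.len w - PySem.Str.len p))

-- ===== PORT A =====
-- match_but_for_leading_whitespace; list indexing via getD "" is exact here: A only calls it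
-- with equal-length lists, so every index is in range
def pvMatchBFLW (wl pl : List String) : Option String :=
  let num := wl.length
  if (List.range num).all
      (fun i => PySem.Str.lstrip (wl.getD i "") == PySem.Str.lstrip (pl.getD i "")) then
    let add : PySem.Set String := PySem.Set.ofList ((List.range num).filterMap (fun i =>
      if PySem.Str.strip (wl.getD i "") ≠ "" then some (pvPrefixOf (wl.getD i "") (pl.getD i ""))
      else none))
    if add.length ≠ 1 then none else some (add.getD 0 "")
  else none

-- the for-loop over range(len(whole_lines) - num_part_lines + 1)
def pvLoopA (whole part repl : List String) : List Int → Option String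
  | [] => none
  | i :: rest =>
    match pvMatchBFLW (PySem.List.slice whole (some i) (some (i + PySem.List.len part))) part with
    | none => pvLoopA whole part repl rest
    | some add => some (pvSplice whole (pvAddIndent add repl) i (i + PySem.List.len part))

def replace_part_with_missing_leading_whitespace (whole_lines : List String) (part_lines : List String) (replace_lines : List String) : Option String :=
  let leading := pvLeads part_lines ++ pvLeads replace_lines
  let pr : List String × List String :=
    match PySem.List.min? leading (fun x => x) with
    | some k => if k ≠ 0 then (pvDedent k part_lines, pvDedent k replace_lines)
                else (part_lines, replace_lines)
    | none => (part_lines, replace_lines)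
  pvLoopA whole_lines pr.1 pr.2
    (PySem.List.pyRange 0 (PySem.List.len whole_lines - PySem.List.len pr.1 + 1) 1)

-- ===== PORT B =====
-- _match_indent: ONE fused pass over zip(window, part): stripped equality and uniform prefix together
def pvMatchIndent (add : Option String) : List (String × String) → Option String
  | [] => add
  | (w, p) :: rest =>
    if PySem.Str.lstrip w ≠ PySem.Str.lstrip p then none
    else if PySem.Str.strip w = "" then pvMatchIndent add rest
    else
      let pref := pvPrefixOf w p
      match add with
      | none => pvMatchIndent (some pref) rest
      | some a => if a = pref then pvMatchIndent add rest else none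

-- the for-loop over the anchor occurrence list occ (j runs over anchor positions, i = j - t)
def pvLoopB (whole part repl : List String) (t n m : Int) : List Int → Option String
  | [] => none
  | j :: rest =>
    if j - t < 0 ∨ j - t > n - m then pvLoopB whole part repl t n m rest
    else
      match pvMatchIndent none
          ((PySem.List.slice whole (some (j - t)) (some (j - t + m))).zip part) with
      | none => pvLoopB whole part repl t n m rest
      | some add => some (pvSplice whole (pvAddIndent add repl) (j - t) (j - t + m))

def replace_part_with_missing_leading_whitespace_alt (whole_lines : List String) (part_lines : List String) (replace_lines : List String) : Option String :=
  let leading := pvLeads (part_lines ++ replace_lines)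
  let pr : List String × List String :=
    match PySem.List.min? leading (fun x => x) with
    | some k => if k ≠ 0 then (pvDedent k part_lines, pvDedent k replace_lines)
                else (part_lines, replace_lines)
    | none => (part_lines, replace_lines)
  let part := pr.1
  let m := PySem.List.len part
  if m = 0 then none
  else
    let sw := whole_lines.map PySem.Str.lstrip
    let sp := part.map PySem.Str.lstrip
    let n := PySem.List.len whole_lines
    -- cnt[s] = cnt.get(s, 0) + 1 over sw
    let cnt : PySem.Dict String Int := sw.foldl (fun d s => d.modify s 0 (· + 1)) PySem.Dict.empty
    -- t = min(range(m), key=lambda k: cnt.get(sp[k], 0)); m ≥ 1 so the range is nonempty (getD 0 unreachable)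
    let t := (PySem.List.min? (PySem.List.pyRange 0 m 1)
                (fun k => cnt.getD (PySem.List.pyGetD sp k "") 0)).getD 0
    let key := PySem.List.pyGetD sp t ""
    -- occ = [j for j, s in enumerate(sw) if s == key]
    let occ := (PySem.List.enumerate sw 0).filterMap (fun js => if js.2 == key then some js.1 else none)
    pvLoopB whole_lines part pr.2 t n m occ

-- ===== PRECONDITION & SPEC =====
def Spec_replace_part_with_missing_leading_whitespace (whole_lines : List String) (part_lines : List String) (replace_lines : List String) (out : Option String) : Prop := out = replace_part_with_missing_leading_whitespace_alt whole_lines part_lines replace_lines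
instance (whole_lines : List String) (part_lines : List String) (replace_lines : List String) (out : Option String) : Decidable (Spec_replace_part_with_missing_leading_whitespace whole_lines part_lines replace_lines out) := by unfold Spec_replace_part_with_missing_leading_whitespace; infer_instance

-- ===== CLAIM (what is proved, stated in full; the proofs are below) =====
def Claim_equal_replace_part_with_missing_leading_whitespace : Prop := ∀ (whole_lines : List String) (part_lines : List String) (replace_lines : List String), Dom_replace_part_with_missing_leading_whitespace whole_lines part_lines replace_lines → Spec_replace_part_with_missing_leading_whitespace whole_lines part_lines replace_lines (replace_part_with_missing_leading_whitespace whole_lines part_lines replace_lines)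

-- ===== LEMMAS AND PROOFS =====

theorem pvLeads_append (xs ys : List String) : pvLeads (xs ++ ys) = pvLeads xs ++ pvLeads ys := by
  simp [pvLeads]

-- two strictly increasing integer lists with the same members are equal
theorem sorted_ext (l1 l2 : List Int) (h1 : l1.Pairwise (· < ·)) (h2 : l2.Pairwise (· < ·))
    (hm : ∀ x, x ∈ l1 ↔ x ∈ l2) : l1 = l2 := by
  have n1 : l1.Nodup := h1.imp (fun h => ne_of_lt h)
  have n2 : l2.Nodup := h2.imp (fun h => ne_of_lt h)
  have hp : List.Perm l1 l2 := (List.perm_ext_iff_of_nodup n1 n2).mpr hm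
  exact hp.eq_of_pairwise (fun a b _ _ hab hba => absurd hba (not_lt.mpr hab.le)) h1 h2

theorem filterMap_ite_eq_map_filter {p : Int → Prop} [DecidablePred p] (f : Int → Int) (l : List Int) :
    l.filterMap (fun x => if p x then some (f x) else none) =
      (l.filter (fun x => decide (p x))).map f := by
  induction l with
  | nil => rfl
  | cons x tl ih => by_cases h : p x <;> simp [h, ih]

-- proof-side normal form of A's set-based uniqueness test and of B's fused accumulator
def pvUniformPrefix (add : Option String) : List (String × String) → Option String
  | [] => add
  | (w, p) :: rest =>
    if PySem.Str.strip w = "" then pvUniformPrefix add rest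
    else
      let pref := pvPrefixOf w p
      match add with
      | none => pvUniformPrefix (some pref) rest
      | some a => if a = pref then pvUniformPrefix add rest else none

def pvScan (add : Option String) : List String → Option String
  | [] => add
  | x :: rest =>
    match add with
    | none => pvScan (some x) rest
    | some a => if a = x then pvScan add rest else none

theorem pvUniformPrefix_eq_pvScan (add : Option String) (l : List (String × String)) :
    pvUniformPrefix add l =
      pvScan add (l.filterMap (fun wp =>
        if PySem.Str.strip wp.1 ≠ "" then some (pvPrefixOf wp.1 wp.2) else none)) := by
  induction l generalizing add with
  | nil => rfl
  | cons wp rest ih =>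
    obtain ⟨w, p⟩ := wp
    by_cases hw : PySem.Str.strip w = ""
    · simp [pvUniformPrefix, hw, ih]
    · cases add with
      | none => simp [pvUniformPrefix, hw, ih, pvScan]
      | some a =>
        by_cases ha : a = pvPrefixOf w p
        · simp [pvUniformPrefix, hw, ha, ih, pvScan]
        · simp [pvUniformPrefix, hw, ha, pvScan]

theorem pvScan_some (a : String) (l : List String) :
    pvScan (some a) l = if l.all (fun x => x = a) then some a else none := by
  induction l with
  | nil => rfl
  | cons x rest ih =>
    by_cases hx : a = x
    · subst hx; simp [pvScan, ih]
    · simp only [pvScan]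
      rw [if_neg hx]
      cases hc : ((x :: rest).all fun y => decide (y = a)) with
      | false => simp [hc]
      | true =>
        exfalso
        have := List.all_eq_true.mp hc x (List.mem_cons_self)
        simp at this
        exact hx this.symm

theorem foldl_add_const (x : String) (rest : List String) (h : ∀ y ∈ rest, y = x) :
    rest.foldl PySem.Set.add [x] = [x] := by
  induction rest with
  | nil => rfl
  | cons y t ih =>
    have hy := h y (by simp)
    subst hy
    have : PySem.Set.add [y] y = [y] := by simp [PySem.Set.add, PySem.Set.contains]
    simp only [List.foldl_cons, this]
    exact ih (fun z hz => h z (by simp [hz]))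

theorem pvSet_vs_scan (l : List String) :
    (if (PySem.Set.ofList l).length ≠ 1 then none
     else some ((PySem.Set.ofList l).getD 0 "")) = pvScan none l := by
  cases l with
  | nil => simp [PySem.Set.ofList, PySem.Set.empty, pvScan]
  | cons x rest =>
    have hof : PySem.Set.ofList (x :: rest) = rest.foldl PySem.Set.add [x] := by
      simp [PySem.Set.ofList, PySem.Set.empty, PySem.Set.add, PySem.Set.contains]
    by_cases hall : ∀ y ∈ rest, y = x
    · rw [hof, foldl_add_const x rest hall]
      simp only [pvScan, pvScan_some]
      have hc : (rest.all fun y => decide (y = x)) = true := by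
        rw [List.all_eq_true]; intro y hy; simpa using hall y hy
      simp [hc]
    · push_neg at hall
      obtain ⟨y, hy, hyx⟩ := hall
      have hxm : x ∈ PySem.Set.ofList (x :: rest) := by
        rw [PySem.Set.mem_ofList]; simp
      have hym : y ∈ PySem.Set.ofList (x :: rest) := by
        rw [PySem.Set.mem_ofList]; simp [hy]
      have hlen : (PySem.Set.ofList (x :: rest)).length ≠ 1 := by
        intro h1
        obtain ⟨z, hz⟩ := List.length_eq_one_iff.mp h1
        rw [hz] at hxm hym
        simp at hxm hym
        exact hyx (hym.trans hxm.symm)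
      have hscan : pvScan none (x :: rest) = none := by
        simp only [pvScan, pvScan_some]
        rw [if_neg]
        simp only [List.all_eq_true]
        intro hallb
        exact hyx (by simpa using hallb y hy)
      rw [hscan, if_pos hlen]

theorem range_zip_filterMap {γ : Type} (F : String → String → Option γ) :
    ∀ (wl pl : List String), wl.length = pl.length →
    (List.range wl.length).filterMap (fun i => F (wl.getD i "") (pl.getD i "")) =
    (wl.zip pl).filterMap (fun wp => F wp.1 wp.2)
  | [], pl, h => by simp
  | w :: wt, [], h => by simp at h
  | w :: wt, p :: pt, h => by
    have hlen : wt.length = pt.length := by simpa using h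
    simp only [List.length_cons, List.range_succ_eq_map, List.filterMap_cons,
      List.filterMap_map, List.zip_cons_cons, List.getD_cons_zero]
    have hc : ((fun i => F ((w :: wt).getD i "") ((p :: pt).getD i "")) ∘ Nat.succ) =
        (fun i => F (wt.getD i "") (pt.getD i "")) := by
      funext i; simp [Function.comp, List.getD_cons_succ]
    rw [hc, range_zip_filterMap F wt pt hlen]

theorem range_zip_all (F : String → String → Bool) :
    ∀ (wl pl : List String), wl.length = pl.length →
    (List.range wl.length).all (fun i => F (wl.getD i "") (pl.getD i "")) =
    (wl.zip pl).all (fun wp => F wp.1 wp.2)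
  | [], pl, h => by simp
  | w :: wt, [], h => by simp at h
  | w :: wt, p :: pt, h => by
    have hlen : wt.length = pt.length := by simpa using h
    simp only [List.length_cons, List.range_succ_eq_map, List.all_cons, List.all_map,
      List.zip_cons_cons, List.getD_cons_zero]
    have hc : ((fun i => F ((w :: wt).getD i "") ((p :: pt).getD i "")) ∘ Nat.succ) =
        (fun i => F (wt.getD i "") (pt.getD i "")) := by
      funext i; simp [Function.comp, List.getD_cons_succ]
    rw [hc, range_zip_all F wt pt hlen]

theorem zip_all_beq_eq_map (wl pl : List String) (h : wl.length = pl.length) :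
    (wl.zip pl).all (fun wp => PySem.Str.lstrip wp.1 == PySem.Str.lstrip wp.2) =
    (wl.map PySem.Str.lstrip == pl.map PySem.Str.lstrip) := by
  induction wl generalizing pl with
  | nil => cases pl with
    | nil => simp
    | cons p pt => simp at h
  | cons w wt ih =>
    cases pl with
    | nil => simp at h
    | cons p pt =>
      have hlen : wt.length = pt.length := by simpa using h
      simp only [List.zip_cons_cons, List.all_cons, List.map_cons, ih pt hlen]
      cases hb : (PySem.Str.lstrip w == PySem.Str.lstrip p) with
      | false =>
        simp only [Bool.false_and]
        rw [beq_eq_false_iff_ne] at hb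
        have hres : (PySem.Str.lstrip w :: wt.map PySem.Str.lstrip ==
            PySem.Str.lstrip p :: pt.map PySem.Str.lstrip) = false := by
          rw [beq_eq_false_iff_ne]
          intro hcc
          exact hb (List.cons_eq_cons.mp hcc).1
        rw [hres]
      | true =>
        simp only [Bool.true_and]
        rw [beq_iff_eq] at hb
        cases hc : (wt.map PySem.Str.lstrip == pt.map PySem.Str.lstrip) with
        | true => rw [beq_iff_eq] at hc; simp [List.cons_eq_cons, hb, hc]
        | false =>
          rw [beq_eq_false_iff_ne] at hc
          symm
          rw [beq_eq_false_iff_ne]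
          intro hcc
          exact hc (List.cons_eq_cons.mp hcc).2

theorem match_eq (wl pl : List String) (h : wl.length = pl.length) :
    pvMatchBFLW wl pl =
      if wl.map PySem.Str.lstrip = pl.map PySem.Str.lstrip then
        pvUniformPrefix none (wl.zip pl)
      else none := by
  simp only [pvMatchBFLW]
  rw [range_zip_all (fun w p => PySem.Str.lstrip w == PySem.Str.lstrip p) wl pl h]
  rw [zip_all_beq_eq_map wl pl h]
  rw [range_zip_filterMap (fun w p =>
    if PySem.Str.strip w ≠ "" then some (pvPrefixOf w p) else none) wl pl h]
  rw [pvUniformPrefix_eq_pvScan, ← pvSet_vs_scan]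
  by_cases hmap : wl.map PySem.Str.lstrip = pl.map PySem.Str.lstrip
  · rw [if_pos hmap, if_pos (by simpa using hmap)]
  · rw [if_neg hmap, if_neg (by simpa using hmap)]

-- B's fused pass = lstrip-equality test followed by the prefix scan
theorem pvMatchIndent_eq (l : List (String × String)) (add : Option String) :
    pvMatchIndent add l =
      if l.all (fun wp => PySem.Str.lstrip wp.1 == PySem.Str.lstrip wp.2) then
        pvUniformPrefix add l
      else none := by
  induction l generalizing add with
  | nil => rfl
  | cons wp rest ih =>
    obtain ⟨w, p⟩ := wp
    by_cases he : PySem.Str.lstrip w = PySem.Str.lstrip p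
    · have hb : (PySem.Str.lstrip w == PySem.Str.lstrip p) = true := by simp [he]
      by_cases hr : (rest.all fun wp => PySem.Str.lstrip wp.1 == PySem.Str.lstrip wp.2) = true
      · by_cases hw : PySem.Str.strip w = ""
        · simp [pvMatchIndent, pvUniformPrefix, he, hr, hw, ih]
        · cases add with
          | none => simp [pvMatchIndent, pvUniformPrefix, he, hr, hw, ih]
          | some a =>
            by_cases ha : a = pvPrefixOf w p
            · simp [pvMatchIndent, pvUniformPrefix, he, hr, hw, ha, ih]
            · simp [pvMatchIndent, pvUniformPrefix, he, hr, hw, ha]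
      · by_cases hw : PySem.Str.strip w = ""
        · simp [pvMatchIndent, pvUniformPrefix, he, hr, hw, ih]
        · cases add with
          | none => simp [pvMatchIndent, pvUniformPrefix, he, hr, hw, ih]
          | some a =>
            by_cases ha : a = pvPrefixOf w p
            · simp [pvMatchIndent, pvUniformPrefix, he, hr, hw, ha, ih]
            · simp [pvMatchIndent, pvUniformPrefix, he, hr, hw, ha]
    · simp [pvMatchIndent, he]

theorem matchIndent_eq_matchBFLW (wl pl : List String) (h : wl.length = pl.length) :
    pvMatchIndent none (wl.zip pl) = pvMatchBFLW wl pl := by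
  rw [match_eq wl pl h, pvMatchIndent_eq, zip_all_beq_eq_map wl pl h]
  by_cases hm : wl.map PySem.Str.lstrip = pl.map PySem.Str.lstrip
  · simp [hm]
  · simp [hm]

-- length of an in-range window
theorem window_length (whole part : List String) (i : Int) (hi0 : 0 ≤ i)
    (him : i + PySem.List.len part ≤ PySem.List.len whole) :
    (PySem.List.slice whole (some i) (some (i + PySem.List.len part))).length = part.length := by
  have hm0 : (0 : Int) ≤ i + PySem.List.len part := by
    simp only [PySem.List.len_eq] at *; omega
  have him' : i + (part.length : Int) ≤ (whole.length : Int) := by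
    simpa [PySem.List.len_eq] using him
  rw [PySem.List.slice_toNat _ hi0 hm0]
  simp only [List.length_take, List.length_drop]
  have e1 : (i + PySem.List.len part).toNat = i.toNat + part.length := by
    simp only [PySem.List.len_eq]; omega
  rw [e1]
  omega

-- part is empty after dedent ⇒ A's loop returns none (the prefix set is always empty)
theorem loopA_nil_part (whole repl : List String) (r : List Int) (hr : ∀ i ∈ r, 0 ≤ i) :
    pvLoopA whole [] repl r = none := by
  induction r with
  | nil => rfl
  | cons i rest ih =>
    have hi := hr i (by simp)
    have hw : PySem.List.slice whole (some i) (some (i + PySem.List.len ([] : List String))) = ([] : List String) := by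
      rw [PySem.List.slice_toNat _ hi (by simp [PySem.List.len_eq]; omega)]
      simp [PySem.List.len_eq]
    have hbf : pvMatchBFLW [] [] = none := by decide
    simp only [pvLoopA, hw, hbf]
    exact ih (fun j hj => hr j (by simp [hj]))

-- an anchored skip: if the stripped whole line aligned with part line t differs, no match at i
theorem matchBFLW_none_of_anchor_ne (whole part : List String) (t i : Int)
    (ht0 : 0 ≤ t) (htm : t < PySem.List.len part)
    (hi0 : 0 ≤ i) (him : i + PySem.List.len part ≤ PySem.List.len whole)
    (hne : ¬ (PySem.List.pyGetD (whole.map PySem.Str.lstrip) (i + t) "" ==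
              PySem.List.pyGetD (part.map PySem.Str.lstrip) t "") = true) :
    pvMatchBFLW (PySem.List.slice whole (some i) (some (i + PySem.List.len part))) part = none := by
  have hlen := window_length whole part i hi0 him
  rw [match_eq _ _ hlen, if_neg]
  intro hmap
  apply hne
  have htm' : t.toNat < part.length := by
    simp only [PySem.List.len_eq] at htm; omega
  have htw : t.toNat < (PySem.List.slice whole (some i) (some (i + PySem.List.len part))).length := by
    rw [hlen]; exact htm'
  have hm0 : (0 : Int) ≤ i + PySem.List.len part := by
    simp only [PySem.List.len_eq] at him ⊢; omega
  have hwhole : i.toNat + t.toNat < whole.length := by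
    simp only [PySem.List.len_eq] at him htm; omega
  have hvv : (PySem.List.slice whole (some i) (some (i + PySem.List.len part)))[t.toNat]'htw =
      whole[i.toNat + t.toNat]'hwhole := by
    have hsl := PySem.List.slice_toNat whole hi0 hm0
    rw [List.getElem_of_eq hsl, List.getElem_take, List.getElem_drop]
  have h1 : PySem.Str.lstrip ((PySem.List.slice whole (some i) (some (i + PySem.List.len part)))[t.toNat]'htw) =
      PySem.Str.lstrip (part[t.toNat]'htm') := by
    have h2 := List.getElem_of_eq hmap (i := t.toNat) (by simpa using htw)
    simpa using h2
  have hit0 : (0 : Int) ≤ i + t := by omega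
  have hitn : i + t < ((whole.map PySem.Str.lstrip).length : Int) := by
    simp only [PySem.List.len_eq, List.length_map] at him htm ⊢; omega
  have htsp : t < ((part.map PySem.Str.lstrip).length : Int) := by
    simp only [PySem.List.len_eq, List.length_map] at htm ⊢; omega
  rw [PySem.List.pyGetD_eq_getElem _ _ hit0 hitn, PySem.List.pyGetD_eq_getElem _ _ ht0 htsp]
  have hidx : (i + t).toNat = i.toNat + t.toNat := by omega
  simp only [List.getElem_map, hidx, beq_iff_eq]
  rw [← hvv, h1]

-- dropping unanchored starts from A's loop changes nothing
theorem loopA_filter_anchor (whole part repl : List String) (t : Int)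
    (ht0 : 0 ≤ t) (htm : t < PySem.List.len part) (r : List Int)
    (hr : ∀ i ∈ r, 0 ≤ i ∧ i + PySem.List.len part ≤ PySem.List.len whole) :
    pvLoopA whole part repl r =
      pvLoopA whole part repl (r.filter (fun i =>
        PySem.List.pyGetD (whole.map PySem.Str.lstrip) (i + t) "" ==
        PySem.List.pyGetD (part.map PySem.Str.lstrip) t "")) := by
  induction r with
  | nil => rfl
  | cons i rest ih =>
    obtain ⟨hi0, him⟩ := hr i (by simp)
    have ih' := ih (fun j hj => hr j (by simp [hj]))
    cases hc : (PySem.List.pyGetD (whole.map PySem.Str.lstrip) (i + t) "" ==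
        PySem.List.pyGetD (part.map PySem.Str.lstrip) t "") with
    | false =>
      have hnone := matchBFLW_none_of_anchor_ne whole part t i ht0 htm hi0 him (by simp [hc])
      rw [List.filter_cons_of_neg (by simp [hc])]
      simp only [pvLoopA, hnone]
      exact ih'
    | true =>
      rw [List.filter_cons_of_pos (by rw [hc])]
      simp only [pvLoopA]
      cases hm : pvMatchBFLW (PySem.List.slice whole (some i) (some (i + PySem.List.len part))) part with
      | none => exact ih'
      | some add => rfl

-- B's loop over anchor positions is A's loop over the shifted, bounds-filtered positions
theorem loopB_eq_loopA (whole part repl : List String) (t : Int) (js : List Int) :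
    pvLoopB whole part repl t (PySem.List.len whole) (PySem.List.len part) js =
      pvLoopA whole part repl (js.filterMap (fun j =>
        if j - t < 0 ∨ j - t > PySem.List.len whole - PySem.List.len part then none
        else some (j - t))) := by
  induction js with
  | nil => rfl
  | cons j rest ih =>
    by_cases hb : j - t < 0 ∨ j - t > PySem.List.len whole - PySem.List.len part
    · simp only [pvLoopB, if_pos hb, List.filterMap_cons]
      exact ih
    · have hb' := hb
      rw [not_or, not_lt, not_lt] at hb'
      obtain ⟨hj0, hjm⟩ := hb'
      have hj0' : (0 : Int) ≤ j - t := by omega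
      have him : (j - t) + PySem.List.len part ≤ PySem.List.len whole := by omega
      have hlen : (PySem.List.slice whole (some (j - t)) (some (j - t + PySem.List.len part))).length = part.length :=
        window_length whole part (j - t) hj0' him
      simp only [pvLoopB, if_neg hb, List.filterMap_cons]
      rw [matchIndent_eq_matchBFLW _ _ hlen]
      cases hm : pvMatchBFLW (PySem.List.slice whole (some (j - t)) (some (j - t + PySem.List.len part))) part with
      | none => simp only [pvLoopA]; rw [hm]; exact ih
      | some add => simp only [pvLoopA]; rw [hm]

-- the occurrence list, shifted and bounds-filtered, IS the anchored filter of A's range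
theorem candidates_eq (whole part : List String) (t : Int)
    (ht0 : 0 ≤ t) (htm : t < PySem.List.len part) :
    (((PySem.List.enumerate (whole.map PySem.Str.lstrip) 0).filterMap (fun js =>
        if js.2 == PySem.List.pyGetD (part.map PySem.Str.lstrip) t "" then some js.1
        else none)).filterMap (fun j =>
        if j - t < 0 ∨ j - t > PySem.List.len whole - PySem.List.len part then none
        else some (j - t))) =
      (PySem.List.pyRange 0 (PySem.List.len whole - PySem.List.len part + 1) 1).filter (fun i =>
        PySem.List.pyGetD (whole.map PySem.Str.lstrip) (i + t) "" ==
        PySem.List.pyGetD (part.map PySem.Str.lstrip) t "") := by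
  have hN : PySem.List.len (whole.map PySem.Str.lstrip) = PySem.List.len whole := by
    simp [PySem.List.len_eq]
  rw [PySem.List.enumerate_eq_map_pyRange _ "", List.filterMap_map, List.filterMap_filterMap, hN]
  rw [List.filterMap_congr (g := fun j =>
      if (PySem.List.pyGetD (whole.map PySem.Str.lstrip) j "" ==
            PySem.List.pyGetD (part.map PySem.Str.lstrip) t "") = true ∧
          ¬ (j - t < 0 ∨ j - t > PySem.List.len whole - PySem.List.len part)
        then some (j - t) else none)
    (by
      intro j _
      by_cases h1 : PySem.List.pyGetD (whole.map PySem.Str.lstrip) j "" =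
          PySem.List.pyGetD (part.map PySem.Str.lstrip) t ""
      · by_cases h2 : j - t < 0 ∨ j - t > PySem.List.len whole - PySem.List.len part
        · simp [h1]
          simp only [PySem.List.len_eq] at h2
          split_ifs <;> first | rfl | omega
        · simp [h1]
          simp only [PySem.List.len_eq] at h2
          split_ifs <;> first | rfl | omega
      · simp [h1])]
  rw [filterMap_ite_eq_map_filter]
  apply sorted_ext
  · rw [List.pairwise_map]
    exact ((PySem.List.pairwise_lt_pyRange_one 0 (PySem.List.len whole)).sublist
      List.filter_sublist).imp (by intro a b hab; omega)
  · exact (PySem.List.pairwise_lt_pyRange_one 0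
      (PySem.List.len whole - PySem.List.len part + 1)).sublist List.filter_sublist
  · intro x
    simp only [List.mem_map, List.mem_filter, PySem.List.mem_pyRange_one, decide_eq_true_eq,
      not_or, not_lt, PySem.List.len_eq, List.length_map]
    have htm' := htm
    simp only [PySem.List.len_eq] at htm'
    constructor
    · rintro ⟨j, ⟨⟨hj0, hjN⟩, hkey, hb1, hb2⟩, rfl⟩
      have hjx : j - t + t = j := by omega
      refine ⟨⟨by omega, by omega⟩, ?_⟩
      rw [hjx]
      exact hkey
    · rintro ⟨⟨hx0, hxN⟩, hkey⟩
      exact ⟨x + t, ⟨⟨by omega, by omega⟩, ⟨hkey, by omega, by omega⟩⟩, by omega⟩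

-- B's loop over any anchor offset t inside part finds exactly what A's full scan finds
theorem core_anchor (whole part repl : List String) (t : Int)
    (ht0 : 0 ≤ t) (htm : t < PySem.List.len part) :
    pvLoopA whole part repl
        (PySem.List.pyRange 0 (PySem.List.len whole - PySem.List.len part + 1) 1) =
      pvLoopB whole part repl t (PySem.List.len whole) (PySem.List.len part)
        ((PySem.List.enumerate (whole.map PySem.Str.lstrip) 0).filterMap (fun js =>
          if js.2 == PySem.List.pyGetD (part.map PySem.Str.lstrip) t "" then some js.1
          else none)) := by
  rw [loopB_eq_loopA, candidates_eq whole part t ht0 htm]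
  exact loopA_filter_anchor whole part repl t ht0 htm _ (fun i hi => by
    rw [PySem.List.mem_pyRange_one] at hi
    refine ⟨hi.1, ?_⟩
    simp only [PySem.List.len_eq] at *
    omega)

-- the chosen anchor offset lies inside part, whatever the frequency counter said
theorem t_bounds {F : Int → Int} (m : Int) (h0 : 0 < m) :
    0 ≤ (PySem.List.min? (PySem.List.pyRange 0 m 1) F).getD 0 ∧
      (PySem.List.min? (PySem.List.pyRange 0 m 1) F).getD 0 < m := by
  cases hmin : PySem.List.min? (PySem.List.pyRange 0 m 1) F with
  | none =>
    exfalso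
    have hnil := (PySem.List.min?_eq_none_iff _ _).mp hmin
    rw [PySem.List.pyRange_one_cons (by omega)] at hnil
    exact List.cons_ne_nil _ _ hnil
  | some t0 =>
    simp only [Option.getD_some]
    have hmem := PySem.List.min?_mem hmin
    rwa [PySem.List.mem_pyRange_one] at hmem

-- the whole pipeline after the shared dedent stage
theorem stage2 (whole p2 r2 : List String) :
    pvLoopA whole p2 r2
        (PySem.List.pyRange 0 (PySem.List.len whole - PySem.List.len p2 + 1) 1) =
      (if PySem.List.len p2 = 0 then none
       else
         pvLoopB whole p2 r2
           ((PySem.List.min? (PySem.List.pyRange 0 (PySem.List.len p2) 1)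
               (fun k => ((whole.map PySem.Str.lstrip).foldl
                   (fun d s => d.modify s 0 (· + 1))
                   (PySem.Dict.empty : PySem.Dict String Int)).getD
                 (PySem.List.pyGetD (p2.map PySem.Str.lstrip) k "") 0)).getD 0)
           (PySem.List.len whole) (PySem.List.len p2)
           ((PySem.List.enumerate (whole.map PySem.Str.lstrip) 0).filterMap (fun js =>
             if js.2 == PySem.List.pyGetD (p2.map PySem.Str.lstrip)
                 ((PySem.List.min? (PySem.List.pyRange 0 (PySem.List.len p2) 1)
                     (fun k => ((whole.map PySem.Str.lstrip).foldl
                         (fun d s => d.modify s 0 (· + 1))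
                         (PySem.Dict.empty : PySem.Dict String Int)).getD
                       (PySem.List.pyGetD (p2.map PySem.Str.lstrip) k "") 0)).getD 0) ""
               then some js.1 else none))) := by
  by_cases h0 : PySem.List.len p2 = 0
  · rw [if_pos h0]
    have hp : p2 = [] := by
      rw [PySem.List.len_eq] at h0
      exact List.length_eq_zero_iff.mp (by exact_mod_cast h0)
    subst hp
    exact loopA_nil_part whole r2 _ (fun i hi => (PySem.List.mem_pyRange_one.mp hi).1)
  · rw [if_neg h0]
    have h0' : 0 < PySem.List.len p2 := by
      rw [PySem.List.len_eq] at h0 ⊢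
      omega
    exact core_anchor whole p2 r2 _ (t_bounds _ h0').1 (t_bounds _ h0').2

-- ===== VERDICT (by name: the statement is the Claim_ definition above) =====
theorem replace_part_with_missing_leading_whitespace_spec : Claim_equal_replace_part_with_missing_leading_whitespace := by
  intro whole part repl _
  unfold Spec_replace_part_with_missing_leading_whitespace
  unfold replace_part_with_missing_leading_whitespace replace_part_with_missing_leading_whitespace_alt
  rw [pvLeads_append]
  exact stage2 whole _ _
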